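-- pv_equiv track=rewrite | github.com/mathewthe2/dictionary-media-service | decks.py | map_sentence
-- ===== SOURCE A (Python) =====
-- import string
--
-- def map_sentence(words, example_id, output_map):
--     for (index, word) in enumerate(words):
--         is_repeat = words.index(word) != index
--         if is_repeat:
--             continue
--         if word in string.punctuation or word in '！？。、（）':
--             continue
--         if word not in output_map:
--             output_map[word] = set()
--         output_map[word].add(example_id)
--     return output_map
-- ===== SOURCE B (Python) =====
-- import string
--
-- def map_sentence(words, example_id, output_map):
--     # Single pass: no repeat filter needed, set.add is idempotent.
--     # Mutates output_map in place, like the original.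
--     for word in words:
--         if word in string.punctuation or word in '！？。、（）':
--             continue
--         output_map.setdefault(word, set()).add(example_id)
--     return output_map
-- ===== Notes on version B (the rewrite author's own statement) =====
-- stated objective: faster
-- what changed: B drops the enumerate/words.index repeat filter entirely (adding the same example_id to a set is idempotent) and replaces the membership-test-then-assign dance with one setdefault, so the nested O(n) index scan disappears and the body is a single plain pass.
import Mathlib
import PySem

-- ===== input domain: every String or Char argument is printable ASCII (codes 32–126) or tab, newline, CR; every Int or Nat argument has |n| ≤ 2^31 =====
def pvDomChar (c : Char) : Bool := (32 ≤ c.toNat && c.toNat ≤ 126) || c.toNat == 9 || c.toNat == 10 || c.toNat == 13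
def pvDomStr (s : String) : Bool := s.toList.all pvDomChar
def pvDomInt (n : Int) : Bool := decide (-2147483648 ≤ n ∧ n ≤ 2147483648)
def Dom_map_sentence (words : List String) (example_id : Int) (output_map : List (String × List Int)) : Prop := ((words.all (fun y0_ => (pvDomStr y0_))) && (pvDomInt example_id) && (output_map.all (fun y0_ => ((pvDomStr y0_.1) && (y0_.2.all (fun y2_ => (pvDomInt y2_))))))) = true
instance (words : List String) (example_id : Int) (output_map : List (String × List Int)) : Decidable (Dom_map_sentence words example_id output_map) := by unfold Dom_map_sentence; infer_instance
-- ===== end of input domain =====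

-- B removes A's redundant repeat filter (set-add is idempotent) and uses setdefault: one plain
-- pass instead of a pass with a nested words.index scan. Both Pythons mutate output_map in place
-- identically; the equivalence proved here is about the returned mapping.


-- string.punctuation
def pvPunct : String := "!\"#$%&'()*+,-./:;<=>?@[\\]^_`{|}~"
def pvCJK : String := "！？。、（）"

-- ===== PORT A =====
-- 'output_map[word].add(example_id)' is ported as Dict.modify with default ∅; the key is always
-- present at that point (the line above inserts it), so the default is never used — exact.
def map_sentence (words : List String) (example_id : Int) (output_map : List (String × List Int)) : List (String × List Int) :=
  ((PySem.List.enumerate words 0).foldl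
    (fun d p =>
      let is_repeat : Bool := ((PySem.List.index? words p.2).map (fun k : Nat => (k : Int))) != some p.1
      if is_repeat then d
      else if PySem.Str.isIn p.2 pvPunct || PySem.Str.isIn p.2 pvCJK then d
      else
        let d1 := if d.contains p.2 = false then d.insert p.2 PySem.Set.empty else d
        d1.modify p.2 PySem.Set.empty (fun s => PySem.Set.add s example_id))
    (PySem.Dict.mk output_map)).items

-- ===== PORT B =====
def map_sentence_alt (words : List String) (example_id : Int) (output_map : List (String × List Int)) : List (String × List Int) :=
  (words.foldl
    (fun d word =>
      if PySem.Str.isIn word pvPunct || PySem.Str.isIn word pvCJK then d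
      else (d.setdefault word PySem.Set.empty).modify word PySem.Set.empty
             (fun s => PySem.Set.add s example_id))
    (PySem.Dict.mk output_map)).items

-- ===== PRECONDITION & SPEC =====
-- Pre_ excludes association lists with duplicate keys: no Python dict can present them, so A's
-- behaviour there is an artefact of the list encoding, not of the program.
def Pre_map_sentence (words : List String) (example_id : Int) (output_map : List (String × List Int)) : Prop :=
  (output_map.map Prod.fst).Nodup
instance (words : List String) (example_id : Int) (output_map : List (String × List Int)) : Decidable (Pre_map_sentence words example_id output_map) := by unfold Pre_map_sentence; infer_instance

def pvWitness_map_sentence : List String × Int × (List (String × List Int)) :=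
  (["hi", "!", "hi", "yo"], 3, [("yo", [1])])

def Spec_map_sentence (words : List String) (example_id : Int) (output_map : List (String × List Int)) (out : List (String × List Int)) : Prop := out = map_sentence_alt words example_id output_map
instance (words : List String) (example_id : Int) (output_map : List (String × List Int)) (out : List (String × List Int)) : Decidable (Spec_map_sentence words example_id output_map out) := by unfold Spec_map_sentence; infer_instance

-- ===== CLAIM (what is proved, stated in full; the proofs are below) =====
def Claim_equal_map_sentence : Prop := ∀ (words : List String) (example_id : Int) (output_map : List (String × List Int)), Dom_map_sentence words example_id output_map → Pre_map_sentence words example_id output_map → Spec_map_sentence words example_id output_map (map_sentence words example_id output_map)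

-- ===== LEMMAS AND PROOFS =====

-- The common loop body (B's body; A's non-repeat body is proved equal to it below).
def pvStep (example_id : Int) (d : PySem.Dict String (List Int)) (w : String) : PySem.Dict String (List Int) :=
  if PySem.Str.isIn w pvPunct || PySem.Str.isIn w pvCJK then d
  else (d.setdefault w PySem.Set.empty).modify w PySem.Set.empty (fun s => PySem.Set.add s example_id)

-- A's per-item body, cleaned of let-bindings (proved pointwise equal to A's literal body).
def pvStepA (example_id : Int) (words : List String) (d : PySem.Dict String (List Int)) (p : Int × String) : PySem.Dict String (List Int) :=
  if ((PySem.List.index? words p.2).map (fun k : Nat => (k : Int))) ≠ some p.1 then d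
  else pvStep example_id d p.2

-- w is "saturated" in d: processing it again is a no-op.
def pvSat (example_id : Int) (d : PySem.Dict String (List Int)) (w : String) : Prop :=
  (PySem.Str.isIn w pvPunct || PySem.Str.isIn w pvCJK) = true ∨
  ∃ s, d.get? w = some s ∧ example_id ∈ s

-- canonical "process first occurrences" recursion both folds are reduced to
def pvRun (example_id : Int) (t : List String) (d : PySem.Dict String (List Int)) (seen : List String) : PySem.Dict String (List Int) :=
  match t with
  | [] => d
  | a :: r => pvRun example_id r (if a ∈ seen then d else pvStep example_id d a) (seen ++ [a])

theorem pvRun_cons (example_id : Int) (a : String) (r : List String) (d : PySem.Dict String (List Int)) (seen : List String) :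
    pvRun example_id (a :: r) d seen = pvRun example_id r (if a ∈ seen then d else pvStep example_id d a) (seen ++ [a]) := rfl

theorem pv_insert_self {d : PySem.Dict String (List Int)} {k : String} {v : List Int}
    (hnd : d.keys.Nodup) (hg : d.get? k = some v) : d.insert k v = d := by
  have hc : d.contains k = true := by
    rw [PySem.Dict.contains_eq_isSome_get?, hg]; rfl
  apply PySem.Dict.ext
  rw [PySem.Dict.items_insert_of_contains d v hc]
  conv_rhs => rw [← List.map_id d.items]
  apply List.map_congr_left
  intro p hp
  by_cases hpk : (p.1 == k) = true
  · have hk : p.1 = k := by simpa using hpk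
    have hsome : d.get? p.1 = some p.2 := PySem.Dict.get?_of_mem_items d (by simpa using hp) hnd
    rw [hk, hg] at hsome
    have hv : v = p.2 := Option.some_inj.mp hsome
    obtain ⟨p1, p2⟩ := p
    simp_all
  · simp [hpk]

theorem pv_sat_step_self (eid : Int) (d : PySem.Dict String (List Int)) (w : String) :
    pvSat eid (pvStep eid d w) w := by
  unfold pvSat
  by_cases hp : (PySem.Str.isIn w pvPunct || PySem.Str.isIn w pvCJK) = true
  · exact Or.inl hp
  · right
    unfold pvStep
    rw [if_neg hp]
    unfold PySem.Dict.modify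
    refine ⟨_, PySem.Dict.get?_insert_self _ _ _, ?_⟩
    exact (PySem.Set.mem_add _ _ _).mpr (Or.inr rfl)

theorem pv_sat_preserved (eid : Int) {d : PySem.Dict String (List Int)} {w : String} (v : String)
    (h : pvSat eid d w) : pvSat eid (pvStep eid d v) w := by
  rcases h with hp | ⟨s, hg, hm⟩
  · exact Or.inl hp
  by_cases hwv : w = v
  · subst hwv; exact pv_sat_step_self eid d w
  unfold pvStep
  by_cases hpv : (PySem.Str.isIn v pvPunct || PySem.Str.isIn v pvCJK) = true
  · rw [if_pos hpv]; exact Or.inr ⟨s, hg, hm⟩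
  rw [if_neg hpv]
  right
  refine ⟨s, ?_, hm⟩
  unfold PySem.Dict.modify
  rw [PySem.Dict.get?_insert_of_ne _ _ hwv, PySem.Dict.get?_setdefault_of_ne _ _ hwv, hg]

theorem pv_step_of_sat (eid : Int) {d : PySem.Dict String (List Int)} {w : String}
    (hnd : d.keys.Nodup) (h : pvSat eid d w) : pvStep eid d w = d := by
  unfold pvStep
  rcases h with hp | ⟨s, hg, hm⟩
  · rw [if_pos hp]
  by_cases hp : (PySem.Str.isIn w pvPunct || PySem.Str.isIn w pvCJK) = true
  · rw [if_pos hp]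
  rw [if_neg hp]
  have hc : d.contains w = true := by
    rw [PySem.Dict.contains_eq_isSome_get?, hg]; rfl
  rw [PySem.Dict.setdefault_of_contains d _ hc]
  show d.insert w (PySem.Set.add (d.getD w PySem.Set.empty) eid) = d
  have hgD : d.getD w PySem.Set.empty = s := by
    rw [PySem.Dict.getD_eq_get?_getD, hg]; rfl
  have hadd : PySem.Set.add s eid = s := by
    unfold PySem.Set.add
    rw [if_pos ((PySem.Set.contains_iff s eid).mpr hm)]
  rw [hgD, hadd]
  exact pv_insert_self hnd hg

theorem pv_step_nodup (eid : Int) {d : PySem.Dict String (List Int)} (v : String)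
    (hnd : d.keys.Nodup) : (pvStep eid d v).keys.Nodup := by
  unfold pvStep
  by_cases hp : (PySem.Str.isIn v pvPunct || PySem.Str.isIn v pvCJK) = true
  · rw [if_pos hp]; exact hnd
  rw [if_neg hp]
  unfold PySem.Dict.modify
  apply PySem.Dict.nodup_keys_insert
  rw [PySem.Dict.keys_setdefault]
  by_cases hc : d.contains v = true
  · rw [if_pos hc]; exact hnd
  · rw [if_neg hc]
    have hv : v ∉ d.keys := fun hmem => hc ((PySem.Dict.contains_iff_mem_keys d v).mpr hmem)
    rw [List.nodup_append]
    exact ⟨hnd, List.nodup_singleton v, by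
      intro x hx y hy
      rw [List.mem_singleton] at hy
      subst hy
      exact fun h => hv (h ▸ hx)⟩

-- B's fold equals the canonical recursion.
theorem pv_b_run (eid : Int) : ∀ (t : List String) (d : PySem.Dict String (List Int)) (seen : List String),
    d.keys.Nodup → (∀ w ∈ seen, pvSat eid d w) →
    t.foldl (pvStep eid) d = pvRun eid t d seen := by
  intro t
  induction t with
  | nil => intro d seen _ _; rfl
  | cons a r ih =>
    intro d seen hnd hsat
    by_cases hmem : a ∈ seen
    · have hstep : pvStep eid d a = d := pv_step_of_sat eid hnd (hsat a hmem)
      rw [List.foldl_cons]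
      rw [pvRun_cons]
      rw [if_pos hmem, hstep]
      apply ih d (seen ++ [a]) hnd
      intro w hw
      rcases List.mem_append.mp hw with h | h
      · exact hsat w h
      · simp only [List.mem_singleton] at h; subst h; exact hsat w hmem
    · rw [List.foldl_cons]
      rw [pvRun_cons]
      rw [if_neg hmem]
      apply ih (pvStep eid d a) (seen ++ [a]) (pv_step_nodup eid a hnd)
      intro w hw
      rcases List.mem_append.mp hw with h | h
      · exact pv_sat_preserved eid a (hsat w h)
      · rw [List.mem_singleton] at h
        rw [h]
        exact pv_sat_step_self eid d a

-- A's fold (over the enumerated suffix, repeat test against the whole list) equals the canonical recursion.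
theorem pv_a_run (eid : Int) (words : List String) :
    ∀ (t pre : List String) (d : PySem.Dict String (List Int)), words = pre ++ t →
    (PySem.List.enumerate t (pre.length : Int)).foldl (pvStepA eid words) d = pvRun eid t d pre := by
  intro t
  induction t with
  | nil => intro pre d _; rfl
  | cons a r ih =>
    intro pre d hw
    rw [PySem.List.enumerate_cons, List.foldl_cons]
    rw [pvRun_cons]
    have hnext : ((pre.length : Int) + 1) = (((pre ++ [a]).length : Nat) : Int) := by
      push_cast [List.length_append, List.length_singleton]; ring
    by_cases hmem : a ∈ pre
    · -- repeat: first index of a lies in pre, strictly before pre.length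
      obtain ⟨k, hk⟩ : ∃ k, PySem.List.index? pre a = some k :=
        Option.isSome_iff_exists.mp ((PySem.List.index?_isSome_iff pre a).mpr hmem)
      obtain ⟨hklt, -, -⟩ := PySem.List.getElem_of_index?_eq_some hk
      have hidx : PySem.List.index? words a = some k := by
        rw [hw, PySem.List.index?_append_of_mem (a :: r) hmem, hk]
      have hcond : pvStepA eid words d ((pre.length : Int), a) = d := by
        have hne : (some ((k : Int))) ≠ (some ((pre.length : Int))) := by
          intro h
          have := Option.some_inj.mp h
          omega
        simp only [pvStepA, hidx, Option.map_some]
        exact if_pos hne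
      rw [hcond, if_pos hmem, hnext, ih (pre ++ [a]) d (by rw [hw]; simp)]
    · -- first occurrence: index is exactly pre.length
      have hidx : PySem.List.index? words a = some pre.length := by
        rw [hw, show pre ++ a :: r = (pre ++ [a]) ++ r by simp,
          PySem.List.index?_append_of_mem r (by simp),
          PySem.List.index?_append_singleton_self pre a hmem]
      have hcond : pvStepA eid words d ((pre.length : Int), a) = pvStep eid d a := by
        have heq : ¬ ((some ((pre.length : Int))) ≠ (some ((pre.length : Int)))) := by simp
        simp only [pvStepA, hidx, Option.map_some]
        exact if_neg heq
      rw [hcond, if_neg hmem, hnext, ih (pre ++ [a]) (pvStep eid d a) (by rw [hw]; simp)]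

-- A's literal loop body is pvStepA.
theorem pv_a_body (eid : Int) (words : List String) (d : PySem.Dict String (List Int)) (p : Int × String) :
    (if (((PySem.List.index? words p.2).map (fun k : Nat => (k : Int))) != some p.1 : Bool) then d
     else if PySem.Str.isIn p.2 pvPunct || PySem.Str.isIn p.2 pvCJK then d
     else
       (if d.contains p.2 = false then d.insert p.2 PySem.Set.empty else d).modify p.2 PySem.Set.empty
         (fun s => PySem.Set.add s eid))
    = pvStepA eid words d p := by
  unfold pvStepA pvStep
  generalize ((PySem.List.index? words p.2).map (fun k : Nat => (k : Int))) = m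
  by_cases hrep : m = some p.1
  · rw [hrep]
    rw [if_neg (show ¬ ((some p.1 != some p.1) = true) by simp)]
    rw [if_neg (show ¬ (some p.1 ≠ some p.1) by simp)]
    by_cases hp : (PySem.Str.isIn p.2 pvPunct || PySem.Str.isIn p.2 pvCJK) = true
    · rw [if_pos hp, if_pos hp]
    · rw [if_neg hp, if_neg hp]
      congr 1
      unfold PySem.Dict.setdefault PySem.Dict.insert
      by_cases hc : d.contains p.2 = true
      · simp [hc]
      · simp only [Bool.not_eq_true] at hc
        simp [hc]
  · rw [if_pos (by simp [bne_iff_ne, hrep]), if_pos hrep]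

-- ===== VERDICT (by name: the statement is the Claim_ definition above) =====
theorem map_sentence_spec : Claim_equal_map_sentence := by
  intro words eid output_map _hdom hpre
  unfold Spec_map_sentence map_sentence map_sentence_alt
  have hnd : (PySem.Dict.mk output_map).keys.Nodup := by
    simpa [PySem.Dict.keys] using hpre
  congr 1
  have hAlit : (PySem.List.enumerate words 0).foldl
      (fun d p =>
        let is_repeat : Bool := ((PySem.List.index? words p.2).map (fun k : Nat => (k : Int))) != some p.1
        if is_repeat then d
        else if PySem.Str.isIn p.2 pvPunct || PySem.Str.isIn p.2 pvCJK then d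
        else
          let d1 := if d.contains p.2 = false then d.insert p.2 PySem.Set.empty else d
          d1.modify p.2 PySem.Set.empty (fun s => PySem.Set.add s eid))
      (PySem.Dict.mk output_map)
      = (PySem.List.enumerate words 0).foldl (pvStepA eid words) (PySem.Dict.mk output_map) := by
    apply PySem.List.foldl_congr_mem
    intro acc p _
    exact pv_a_body eid words acc p
  have hA : (PySem.List.enumerate words 0).foldl (pvStepA eid words) (PySem.Dict.mk output_map)
      = pvRun eid words (PySem.Dict.mk output_map) [] := by
    simpa using pv_a_run eid words words [] (PySem.Dict.mk output_map) rfl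
  have hB : words.foldl (pvStep eid) (PySem.Dict.mk output_map)
      = pvRun eid words (PySem.Dict.mk output_map) [] :=
    pv_b_run eid words (PySem.Dict.mk output_map) [] hnd (by intro w hw; cases hw)
  rw [hAlit, hA, ← hB]
  rfl
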